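-- pv_equiv track=rewrite | github.com/Spidartist/IJEPA_endoscopy | src/datasets/polyp.py | process_path
-- ===== SOURCE A (Python) =====
-- def process_path(old_path):
--     old_ls = old_path.split("/")
--     new_ls = []
--     for idx, elem in enumerate(old_ls):
--         if idx < len(old_ls) - 1:
--             new_elem = elem.replace(" ", "_")
--         else:
--             new_elem = elem
--         new_ls.append(new_elem)
--     new_path = "/".join(new_ls)
--     return new_path
-- ===== SOURCE B (Python) =====
-- def process_path(old_path):
--     head, sep, last = old_path.rpartition("/")
--     return head.replace(" ", "_") + sep + last
-- ===== Notes on version B (the rewrite author's own statement) =====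
-- stated objective: simpler
-- what changed: Replaced the split / enumerate-loop / join over path segments by a single rpartition at the last separator plus one global replace on the head (correct because the slash separator contains no spaces).
import Mathlib
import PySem

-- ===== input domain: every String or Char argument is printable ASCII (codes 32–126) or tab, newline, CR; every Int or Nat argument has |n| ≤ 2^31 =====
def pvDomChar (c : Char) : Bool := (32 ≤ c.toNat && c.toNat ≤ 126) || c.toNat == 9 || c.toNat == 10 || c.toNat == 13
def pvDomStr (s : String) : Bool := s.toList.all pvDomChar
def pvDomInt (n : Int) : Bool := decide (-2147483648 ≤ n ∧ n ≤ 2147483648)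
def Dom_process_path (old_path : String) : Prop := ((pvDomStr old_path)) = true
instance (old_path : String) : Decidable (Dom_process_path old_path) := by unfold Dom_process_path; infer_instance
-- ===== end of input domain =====

-- B replaces A's split / per-segment loop / join by one rpartition at the last slash plus a single
-- replace on the head (objective: simpler; correct because the slash separator contains no spaces).


-- ===== PORT A =====
def process_path (old_path : String) : String :=
  let old_ls : List (List Char) := PySem.Chars.splitOn old_path.toList ['/']
  let new_ls : List (List Char) :=
    (PySem.List.enumerate old_ls).foldl
      (fun acc p =>
        let new_elem := if p.1 < (old_ls.length : Int) - 1
          then PySem.Chars.replace p.2 [' '] ['_'] else p.2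
        acc ++ [new_elem]) []
  String.ofList (PySem.Chars.join ['/'] new_ls)

-- ===== PORT B =====
-- exact port of CPython str.rpartition for a NONEMPTY separator (PySem has rfind but no rpartition):
-- the highest occurrence splits s into (before, sep, after); no occurrence gives ('', '', s)
def pyRpartition (s : List Char) (sep : List Char) : List Char × List Char × List Char :=
  let i := PySem.Chars.rfind s sep
  if i < 0 then ([], [], s) else (s.take i.toNat, sep, s.drop (i.toNat + sep.length))

def process_path_alt (old_path : String) : String :=
  let hsl := pyRpartition old_path.toList ['/']
  String.ofList (PySem.Chars.replace hsl.1 [' '] ['_'] ++ hsl.2.1 ++ hsl.2.2)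

-- ===== PRECONDITION & SPEC =====
def Spec_process_path (old_path : String) (out : String) : Prop := out = process_path_alt old_path
instance (old_path : String) (out : String) : Decidable (Spec_process_path old_path out) := by unfold Spec_process_path; infer_instance

-- ===== CLAIM (what is proved, stated in full; the proofs are below) =====
def Claim_equal_process_path : Prop := ∀ (old_path : String), Dom_process_path old_path → Spec_process_path old_path (process_path old_path)

-- ===== LEMMAS AND PROOFS =====

-- the character substitution performed by ".replace(' ', '_')"
def subSp (c : Char) : Char := if c = ' ' then '_' else c

-- reference form of splitting on '/'
def mySplit : List Char → List (List Char)
  | [] => [[]]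
  | c :: t =>
    if c = '/' then [] :: mySplit t
    else
      match mySplit t with
      | [] => [[c]]
      | h :: ts => (c :: h) :: ts

-- "map subSp on every part but the last"
def mbl (ps : List (List Char)) : List (List Char) :=
  ps.dropLast.map (List.map subSp) ++ ps.drop (ps.length - 1)

-- reference result: substitute spaces at every position that has a '/' somewhere after it
def Rres : List Char → List Char
  | [] => []
  | c :: t => (if '/' ∈ t then subSp c else c) :: Rres t

lemma mySplit_ne_nil (t : List Char) : mySplit t ≠ [] := by
  cases t with
  | nil => simp [mySplit]
  | cons c t =>
    simp only [mySplit]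
    split_ifs
    · simp
    · cases h : mySplit t <;> simp

lemma mySplit_of_not_mem (t : List Char) (h : '/' ∉ t) : mySplit t = [t] := by
  induction t with
  | nil => rfl
  | cons c t ih =>
    simp only [List.mem_cons, not_or] at h
    have hc : ¬ c = '/' := fun hh => h.1 hh.symm
    simp [mySplit, hc, ih h.2]

lemma mySplit_mem_len (t : List Char) (h : '/' ∈ t) : 2 ≤ (mySplit t).length := by
  induction t with
  | nil => simp at h
  | cons c t ih =>
    simp only [mySplit]
    split_ifs with hc
    · have := mySplit_ne_nil t
      rcases List.exists_cons_of_ne_nil this with ⟨p, ps, hp⟩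
      simp [hp]
    · have hm : '/' ∈ t := by
        rcases List.mem_cons.mp h with h1 | h1
        · exact absurd h1.symm hc
        · exact h1
      cases hms : mySplit t with
      | nil => exact absurd hms (mySplit_ne_nil t)
      | cons p ps => have := ih hm; rw [hms] at this; simpa using this

lemma mbl_singleton (p : List Char) : mbl [p] = [p] := by simp [mbl]

lemma mbl_cons_cons (p q : List Char) (rest : List (List Char)) :
    mbl (p :: q :: rest) = List.map subSp p :: mbl (q :: rest) := by
  simp [mbl, List.dropLast_cons_of_ne_nil]

lemma mbl_ne_nil (ps : List (List Char)) (h : ps ≠ []) : mbl ps ≠ [] := by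
  cases ps with
  | nil => exact absurd rfl h
  | cons p rest =>
    cases rest with
    | nil => simp [mbl_singleton]
    | cons q qs => simp [mbl_cons_cons]

lemma subSp_slash : subSp '/' = '/' := by decide

lemma Rres_of_not_mem (t : List Char) (h : '/' ∉ t) : Rres t = t := by
  induction t with
  | nil => rfl
  | cons c t ih =>
    simp only [List.mem_cons, not_or] at h
    simp [Rres, h.2, ih h.2]

lemma replace_go_map (cs : List Char) : ∀ (acc : List Char) (fuel : Nat), cs.length ≤ fuel →
    PySem.Chars.replace.go [' '] ['_'] fuel cs acc = acc.reverse ++ cs.map subSp := by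
  induction cs with
  | nil => intro acc fuel h; cases fuel <;> simp [PySem.Chars.replace.go]
  | cons c t ih =>
    intro acc fuel h
    cases fuel with
    | zero => simp at h
    | succ fuel =>
      have step : PySem.Chars.replace.go [' '] ['_'] (fuel+1) (c::t) acc =
          (if c = ' ' then PySem.Chars.replace.go [' '] ['_'] fuel t ('_'::acc)
           else PySem.Chars.replace.go [' '] ['_'] fuel t (c::acc)) := by
        simp only [PySem.Chars.replace.go, List.isPrefixOf, List.length_cons, List.length_nil,
          List.drop_succ_cons, List.drop_zero, List.reverse_cons, List.reverse_nil,
          List.nil_append, Bool.and_true, beq_iff_eq]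
        by_cases hc : c = ' '
        · rw [if_pos (by rw [hc]), if_pos hc]; rfl
        · rw [if_neg (by rw [eq_comm] at hc; exact hc), if_neg hc]
      have ht : t.length ≤ fuel := by simp at h; omega
      rw [step]
      split_ifs with hc <;> simp [ih _ _ ht, subSp, hc]

lemma replace_map (cs : List Char) :
    PySem.Chars.replace cs [' '] ['_'] = cs.map subSp := by
  have := replace_go_map cs [] cs.length le_rfl
  simpa [PySem.Chars.replace] using this

lemma splitOn_go_eq (l : List Char) : ∀ (fuel : Nat) (cur : List Char) (acc : List (List Char)),
    l.length ≤ fuel →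
    PySem.Chars.splitOn.go ['/'] fuel l cur acc =
      acc.reverse ++ (match mySplit l with
        | [] => [cur.reverse]
        | h :: ts => (cur.reverse ++ h) :: ts) := by
  induction l with
  | nil =>
    intro fuel cur acc h
    cases fuel <;> simp [PySem.Chars.splitOn.go, mySplit]
  | cons c t ih =>
    intro fuel cur acc h
    cases fuel with
    | zero => simp at h
    | succ fuel =>
      have ht : t.length ≤ fuel := by simp at h; omega
      have step : PySem.Chars.splitOn.go ['/'] (fuel+1) (c::t) cur acc =
          (if c = '/' then PySem.Chars.splitOn.go ['/'] fuel t [] (cur.reverse :: acc)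
           else PySem.Chars.splitOn.go ['/'] fuel t (c :: cur) acc) := by
        simp only [PySem.Chars.splitOn.go, List.isPrefixOf, List.length_cons, List.length_nil,
          List.drop_succ_cons, List.drop_zero, Bool.and_true, beq_iff_eq]
        by_cases hc : c = '/'
        · rw [if_pos (by rw [hc]), if_pos hc]
        · rw [if_neg (by rw [eq_comm] at hc; exact hc), if_neg hc]
      rw [step]
      split_ifs with hc
      · rw [ih fuel [] (cur.reverse :: acc) ht]
        simp only [mySplit, hc]
        cases hm : mySplit t with
        | nil => exact absurd hm (mySplit_ne_nil t)
        | cons h ts => simp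
      · rw [ih fuel (c :: cur) acc ht]
        simp only [mySplit, hc]
        cases hm : mySplit t with
        | nil => exact absurd hm (mySplit_ne_nil t)
        | cons h ts => simp

lemma splitOn_eq_mySplit (cs : List Char) :
    PySem.Chars.splitOn cs ['/'] = mySplit cs := by
  have := splitOn_go_eq cs (cs.length + 1) [] [] (by omega)
  rw [PySem.Chars.splitOn, this]
  cases hm : mySplit cs with
  | nil => exact absurd hm (mySplit_ne_nil cs)
  | cons h ts => simp

lemma rfind_go_succ (s sub : List Char) (n : Nat) :
    PySem.Chars.rfind.go s sub (n + 1) =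
      (if sub.isPrefixOf (List.drop (n + 1) s) then ((n : Int) + 1) else PySem.Chars.rfind.go s sub n) := by
  conv_lhs => rw [PySem.Chars.rfind.go]
  push_cast
  ring_nf

lemma rfind_go_zero (s sub : List Char) :
    PySem.Chars.rfind.go s sub 0 = (if sub.isPrefixOf s then 0 else -1) := by
  rw [PySem.Chars.rfind.go]

lemma rfind_go_cons (c x : Char) (t : List Char) : ∀ (n : Nat),
    PySem.Chars.rfind.go (c :: t) [x] (n + 1) =
      (if PySem.Chars.rfind.go t [x] n = -1 then (if c = x then 0 else -1)
       else PySem.Chars.rfind.go t [x] n + 1) := by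
  intro n
  induction n with
  | zero =>
    rw [rfind_go_succ, rfind_go_zero, rfind_go_zero]
    simp only [List.drop_succ_cons, List.drop_zero]
    by_cases pt : [x].isPrefixOf t = true
    · rw [if_pos pt, if_pos pt]; norm_num
    · rw [if_neg pt, if_neg pt]
      simp only [List.isPrefixOf, Bool.and_true, beq_iff_eq]
      norm_num
      by_cases pc : c = x
      · rw [if_pos (by rw [pc]), if_pos pc]
      · rw [if_neg (by rw [eq_comm] at pc; exact pc), if_neg pc]
  | succ n ih =>
    rw [rfind_go_succ, ih, rfind_go_succ, List.drop_succ_cons]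
    have hge : PySem.Chars.rfind.go t [x] n = -1 ∨ 0 ≤ PySem.Chars.rfind.go t [x] n := by
      clear ih
      induction n with
      | zero => rw [rfind_go_zero]; split_ifs <;> simp
      | succ m ihm =>
        rw [rfind_go_succ]; split_ifs
        · right; positivity
        · exact ihm
    by_cases p1 : [x].isPrefixOf (List.drop (n + 1) t) = true <;>
      rcases hge with hn | hn <;> simp [p1, hn] <;> split_ifs <;> omega

lemma rfind_cons (c x : Char) (t : List Char) :
    PySem.Chars.rfind (c :: t) [x] =
      (if PySem.Chars.rfind t [x] = -1 then (if c = x then 0 else -1)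
       else PySem.Chars.rfind t [x] + 1) := by
  simp only [PySem.Chars.rfind, List.length_cons]
  exact rfind_go_cons c x t t.length

lemma rfind_nil (x : Char) : PySem.Chars.rfind [] [x] = -1 := by
  simp [PySem.Chars.rfind, rfind_go_zero, List.isPrefixOf]

lemma rfind_ge_neg_one (x : Char) (t : List Char) : -1 ≤ PySem.Chars.rfind t [x] := by
  induction t with
  | nil => rw [rfind_nil]
  | cons c t ih => rw [rfind_cons]; split_ifs <;> omega

lemma rfind_neg_one_iff (x : Char) (t : List Char) :
    PySem.Chars.rfind t [x] = -1 ↔ x ∉ t := by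
  induction t with
  | nil => simp [rfind_nil]
  | cons c t ih =>
    rw [rfind_cons]
    have hge := rfind_ge_neg_one x t
    by_cases hm : x ∈ t
    · have h1 : PySem.Chars.rfind t [x] ≠ -1 := by simpa [ih] using hm
      simp only [if_neg h1]
      constructor
      · intro h; omega
      · intro h; simp at h; exact absurd hm h.2
    · have h1 : PySem.Chars.rfind t [x] = -1 := ih.mpr hm
      simp only [if_pos h1]
      split_ifs with hc <;> simp_all [eq_comm]

lemma rfind_nonneg_mem (x : Char) (t : List Char) (h : x ∈ t) : 0 ≤ PySem.Chars.rfind t [x] := by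
  have h1 : PySem.Chars.rfind t [x] ≠ -1 :=
    fun he => absurd h ((rfind_neg_one_iff x t).mp he)
  have := rfind_ge_neg_one x t
  omega

-- B's body, on char lists, equals the reference result
lemma B_eq_R (cs : List Char) :
    PySem.Chars.replace (pyRpartition cs ['/']).1 [' '] ['_'] ++
      (pyRpartition cs ['/']).2.1 ++ (pyRpartition cs ['/']).2.2 = Rres cs := by
  induction cs with
  | nil => simp [pyRpartition, rfind_nil, Rres, replace_map]
  | cons c t ih =>
    by_cases hm : '/' ∈ t
    · have h0 : 0 ≤ PySem.Chars.rfind t ['/'] := rfind_nonneg_mem _ _ hm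
      have h1 : PySem.Chars.rfind t ['/'] ≠ -1 := by omega
      obtain ⟨k, hk⟩ := Int.eq_ofNat_of_zero_le h0
      have hcons : PySem.Chars.rfind (c :: t) ['/'] = (k : Int) + 1 := by
        rw [rfind_cons, if_neg h1, hk]
      simp only [pyRpartition, hcons, hk] at ih ⊢
      rw [if_neg (by omega)] at ih
      rw [if_neg (by omega)]
      norm_num at ih ⊢
      rw [replace_map] at ih ⊢
      simp only [List.map_cons, List.cons_append, Rres, if_pos hm]
      exact congrArg _ ih
    · have h1 : PySem.Chars.rfind t ['/'] = -1 := (rfind_neg_one_iff _ _).mpr hm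
      have hcons : PySem.Chars.rfind (c :: t) ['/'] = (if c = '/' then 0 else -1) := by
        rw [rfind_cons, if_pos h1]
      by_cases hc : c = '/'
      · simp only [hcons, if_pos hc, pyRpartition]
        norm_num [replace_map, Rres, hm, hc, Rres_of_not_mem t hm]
      · simp only [hcons, if_neg hc, pyRpartition]
        norm_num [replace_map, Rres, hm, hc, Rres_of_not_mem t hm]

-- A's enumerate-indexed conditional map is exactly "map subSp on every part but the last"
lemma enumerate_map_butLast (xs : List (List Char)) :
    ∀ (s n : Nat), s + xs.length = n →
    (PySem.List.enumerate xs (s : Int)).map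
        (fun p => if p.1 < (n : Int) - 1 then List.map subSp p.2 else p.2)
      = mbl xs := by
  induction xs with
  | nil => intro s n h; simp [PySem.List.enumerate, mbl]
  | cons x t ih =>
    intro s n h
    cases t with
    | nil =>
      have hs : ¬ ((s : Int) < (n : Int) - 1) := by simp at h; omega
      simp [PySem.List.enumerate, hs, mbl_singleton]
    | cons y ts =>
      have hlt : (s : Int) < (n : Int) - 1 := by simp at h; omega
      have hrec := ih (s + 1) n (by simp at h ⊢; omega)
      rw [PySem.List.enumerate_cons]
      push_cast at hrec
      simp only [List.map_cons, if_pos hlt, hrec, mbl_cons_cons]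

-- join of "every part but the last mapped" over the reference split is the reference result
lemma A_eq_R (cs : List Char) :
    PySem.Chars.join ['/'] (mbl (mySplit cs)) = Rres cs := by
  induction cs with
  | nil => simp [mySplit, mbl_singleton, Rres, PySem.Chars.join_singleton]
  | cons c t ih =>
    by_cases hc : c = '/'
    · subst hc
      cases hm : mySplit t with
      | nil => exact absurd hm (mySplit_ne_nil t)
      | cons h ts =>
        rw [hm] at ih
        have hmb : mbl (h :: ts) ≠ [] := mbl_ne_nil _ (by simp)
        obtain ⟨y, yr, hy⟩ := List.exists_cons_of_ne_nil hmb
        have hsp : mySplit ('/' :: t) = [] :: h :: ts := by simp [mySplit, hm]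
        rw [hsp, mbl_cons_cons, List.map_nil, hy, PySem.Chars.join_cons_cons, List.nil_append,
          ← hy, ih]
        simp [Rres, subSp_slash]
    · by_cases hm : '/' ∈ t
      · cases hms : mySplit t with
        | nil => exact absurd hms (mySplit_ne_nil t)
        | cons h ts =>
          cases ts with
          | nil =>
            exfalso
            have := mySplit_mem_len t hm
            rw [hms] at this; simp at this
          | cons q qs =>
            rw [hms] at ih
            have hmb : mbl (q :: qs) ≠ [] := mbl_ne_nil _ (by simp)
            obtain ⟨y, yr, hy⟩ := List.exists_cons_of_ne_nil hmb
            have hsplit : mySplit (c :: t) = (c :: h) :: q :: qs := by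
              simp only [mySplit, if_neg hc, hms]
            rw [hsplit, mbl_cons_cons, List.map_cons, hy, PySem.Chars.join_cons_cons]
            rw [mbl_cons_cons, hy, PySem.Chars.join_cons_cons] at ih
            simp only [Rres, if_pos hm]
            rw [← ih]
            simp
      · have hms : mySplit t = [t] := mySplit_of_not_mem t hm
        have hsplit : mySplit (c :: t) = [c :: t] := by
          simp only [mySplit, if_neg hc, hms]
        rw [hsplit, mbl_singleton, PySem.Chars.join_singleton]
        simp [Rres, hm, Rres_of_not_mem t hm]

theorem process_path_eq (old_path : String) :
    process_path old_path = process_path_alt old_path := by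
  unfold process_path process_path_alt
  dsimp only
  congr 1
  rw [PySem.List.foldl_append_singleton_eq_map, List.nil_append, splitOn_eq_mySplit]
  have hfun : (fun p : Int × List Char =>
        if p.1 < ((mySplit old_path.toList).length : Int) - 1
        then PySem.Chars.replace p.2 [' '] ['_'] else p.2) =
      (fun p : Int × List Char =>
        if p.1 < (((mySplit old_path.toList).length : Nat) : Int) - 1
        then List.map subSp p.2 else p.2) := by
    funext p; rw [replace_map]
  rw [hfun]
  have h0 : (0 : Int) = ((0 : Nat) : Int) := rfl
  rw [h0, enumerate_map_butLast (mySplit old_path.toList) 0 (mySplit old_path.toList).length (by omega)]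
  rw [A_eq_R, ← B_eq_R]

-- ===== VERDICT (by name: the statement is the Claim_ definition above) =====
theorem process_path_spec : Claim_equal_process_path := by
  intro old_path _
  unfold Spec_process_path
  exact process_path_eq old_path
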